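-- pv_equiv track=rewrite | github.com/EBISPOT/gwas-sumstats-service | sumstats_service/resources/api_utils.py | get_md5_for_accession
-- ===== SOURCE A (Python) =====
-- def get_md5_for_accession(
--     md5_checksums: dict,
--     accession_id: str,
--     is_harmonised=False,
-- ) -> dict:
--     """
--     Return the key (filename) and value (MD5 checksum) from md5_checksums.
--
--     First, check if there's a key that ends with accession_id.tsv.gz or
--     accession_id.tsv OR accession_id.h.tsv.gz or accession_id.h.tsv.
--
--     Then check for partial matches if no exact match is found.
--
--     If still no match, look for any .tsv, .tsv.gz, .txt or .txt.gz files.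
--
--     Parameters:
--     - md5_checksums: Dictionary with filenames as keys and their MD5 checksums as
--     values.
--     - accession_id: The accession ID to look for, with .tsv or .tsv.gz extensions.
--     - is_harmonised: Boolean to look for files in harmonised folders
--
--     Returns:
--     - A dictionary with the matching filename and its MD5 checksum. Empty if no
--     match is found.
--     """
--     # Check for exact matches first
--     for key in md5_checksums:
--         if not is_harmonised:
--             if key.endswith((f"{accession_id}.tsv", f"{accession_id}.tsv.gz")):
--                 return {key: md5_checksums[key]}
--         else:
--             if key.endswith((f"{accession_id}.h.tsv", f"{accession_id}.h.tsv.gz")):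
--                 return {key: md5_checksums[key]}
--
--     # Check for partial matches if no exact match is found
--     # i.e., files are named <GCST ID>_<build number>.*
--     # e.g. http://ftp.ebi.ac.uk/pub/databases/gwas/summary_statistics/GCST90308001-GCST90309000/GCST90308682/ # noqa:E501
--     for key in md5_checksums:
--         if (
--             accession_id in key
--             and key.endswith((".tsv", ".tsv.gz", ".txt", ".txt.gz", ".csv", ".csv.gz"))
--             and ".yaml" not in key
--             and ".tbi" not in key
--             and "running.log" not in key
--             and "README" not in key
--             and not key.endswith((".f.tsv", ".f.tsv.gz"))
--         ):
--             return {key: md5_checksums[key]}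
--
--     # If still no match, look for any .tsv, .tsv.gz, .txt or .txt.gz files
--     # except md5sums.txt and YAML files. This is probably very early
--     # submission where files are named freely,
--     # e.g., http://ftp.ebi.ac.uk/pub/databases/gwas/summary_statistics/GCST005001-GCST006000/GCST005529/ # noqa:E501
--     for key in md5_checksums:
--         if (
--             key.endswith((".tsv", ".tsv.gz", ".txt", ".txt.gz", ".csv", ".csv.gz"))
--             and key != "md5sums.txt"
--             and ".yaml" not in key
--             and ".tbi" not in key
--             and "running.log" not in key
--             and "README" not in key
--             and not key.endswith((".f.tsv", ".f.tsv.gz"))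
--         ):
--             return {key: md5_checksums[key]}
--
--     return {}
-- ===== SOURCE B (Python) =====
-- _EXTS = (".tsv", ".tsv.gz", ".txt", ".txt.gz", ".csv", ".csv.gz")
--
--
-- def _tier(key, accession_id, is_harmonised):
--     """Smallest priority tier this filename satisfies (4 = no match)."""
--     if is_harmonised:
--         if key.endswith((f"{accession_id}.h.tsv", f"{accession_id}.h.tsv.gz")):
--             return 1
--     else:
--         if key.endswith((f"{accession_id}.tsv", f"{accession_id}.tsv.gz")):
--             return 1
--     clean = (
--         key.endswith(_EXTS)
--         and ".yaml" not in key
--         and ".tbi" not in key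
--         and "running.log" not in key
--         and "README" not in key
--         and not key.endswith((".f.tsv", ".f.tsv.gz"))
--     )
--     if clean and accession_id in key:
--         return 2
--     if clean and key != "md5sums.txt":
--         return 3
--     return 4
--
--
-- def get_md5_for_accession(md5_checksums, accession_id, is_harmonised=False):
--     best_tier = 4
--     best = None
--     for key, value in md5_checksums.items():
--         t = _tier(key, accession_id, is_harmonised)
--         if t < best_tier:
--             best_tier = t
--             best = (key, value)
--     return {best[0]: best[1]} if best is not None else {}
-- ===== Notes on version B (the rewrite author's own statement) =====
-- stated objective: alternative
-- what changed: Replaces A's three sequential scans of the dict (exact / partial / any match) by a single pass that assigns every filename its smallest matching priority tier and keeps the first item whose tier is strictly smaller than the best seen so far.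
import Mathlib
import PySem

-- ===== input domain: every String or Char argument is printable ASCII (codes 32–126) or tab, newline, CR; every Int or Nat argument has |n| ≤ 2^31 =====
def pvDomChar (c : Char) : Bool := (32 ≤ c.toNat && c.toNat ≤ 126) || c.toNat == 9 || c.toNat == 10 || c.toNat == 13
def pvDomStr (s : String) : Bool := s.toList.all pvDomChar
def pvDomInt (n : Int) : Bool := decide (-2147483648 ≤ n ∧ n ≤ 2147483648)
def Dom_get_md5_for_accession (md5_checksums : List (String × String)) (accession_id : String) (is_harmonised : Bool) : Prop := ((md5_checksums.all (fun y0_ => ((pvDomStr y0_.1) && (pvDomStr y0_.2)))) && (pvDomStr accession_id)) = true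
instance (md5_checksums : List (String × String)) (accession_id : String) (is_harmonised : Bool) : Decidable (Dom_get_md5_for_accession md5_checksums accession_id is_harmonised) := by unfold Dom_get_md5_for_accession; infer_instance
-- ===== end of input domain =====

-- B replaces A's three sequential scans of the dict by ONE pass that keeps the first key of the
-- smallest matching priority tier (objective: alternative decomposition, same exact result).

-- ===== PORT A =====
-- key.endswith((f"{accession_id}.tsv", f"{accession_id}.tsv.gz")) / the .h.tsv variants (loop 1's condition)
def pvExact (acc : List Char) (h : Bool) (k : List Char) : Bool :=
  if h = false then
    PySem.Chars.endswith k (acc ++ ".tsv".toList) || PySem.Chars.endswith k (acc ++ ".tsv.gz".toList)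
  else
    PySem.Chars.endswith k (acc ++ ".h.tsv".toList) || PySem.Chars.endswith k (acc ++ ".h.tsv.gz".toList)

-- key.endswith((".tsv", ".tsv.gz", ".txt", ".txt.gz", ".csv", ".csv.gz"))
def pvExts (k : List Char) : Bool :=
  PySem.Chars.endswith k ".tsv".toList || PySem.Chars.endswith k ".tsv.gz".toList ||
  PySem.Chars.endswith k ".txt".toList || PySem.Chars.endswith k ".txt.gz".toList ||
  PySem.Chars.endswith k ".csv".toList || PySem.Chars.endswith k ".csv.gz".toList

-- '.yaml' not in key and '.tbi' not in key and 'running.log' not in key and 'README' not in key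
-- and not key.endswith(('.f.tsv', '.f.tsv.gz'))
def pvNoJunk (k : List Char) : Bool :=
  !PySem.Chars.isIn ".yaml".toList k && !PySem.Chars.isIn ".tbi".toList k &&
  !PySem.Chars.isIn "running.log".toList k && !PySem.Chars.isIn "README".toList k &&
  !(PySem.Chars.endswith k ".f.tsv".toList || PySem.Chars.endswith k ".f.tsv.gz".toList)

-- loop 2's condition
def pvPartial (acc : List Char) (k : List Char) : Bool :=
  PySem.Chars.isIn acc k && pvExts k && pvNoJunk k

-- loop 3's condition
def pvAny (k : List Char) : Bool :=
  pvExts k && (k != "md5sums.txt".toList) && pvNoJunk k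

-- A: three sequential scans over the dict's keys, each returning on its first hit.
def get_md5_for_accession (md5_checksums : List (String × String)) (accession_id : String) (is_harmonised : Bool) : List (String × String) :=
  let items := (PySem.Dict.ofList md5_checksums).items
  match items.find? (fun kv => pvExact accession_id.toList is_harmonised kv.1.toList) with
  | some kv => [kv]
  | none =>
    match items.find? (fun kv => pvPartial accession_id.toList kv.1.toList) with
    | some kv => [kv]
    | none =>
      match items.find? (fun kv => pvAny kv.1.toList) with
      | some kv => [kv]
      | none => []

-- ===== PORT B =====
-- Source B's 'clean' conjunct of _tier
def pvClean (k : List Char) : Bool := pvExts k && pvNoJunk k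

-- Source B's _tier: the smallest priority tier the filename satisfies (4 = no match)
def pvTier (acc : List Char) (h : Bool) (k : List Char) : Nat :=
  if pvExact acc h k then 1
  else if pvClean k && PySem.Chars.isIn acc k then 2
  else if pvClean k && (k != "md5sums.txt".toList) then 3
  else 4

-- the loop body: update (best_tier, best) on a strictly smaller tier
def pvStep (acc : List Char) (h : Bool) (best : Nat × Option (String × String)) (kv : String × String) : Nat × Option (String × String) :=
  let t := pvTier acc h kv.1.toList
  if t < best.1 then (t, some kv) else best

-- B: one pass keeping the first item of the smallest tier.
def get_md5_for_accession_alt (md5_checksums : List (String × String)) (accession_id : String) (is_harmonised : Bool) : List (String × String) :=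
  let items := (PySem.Dict.ofList md5_checksums).items
  match (items.foldl (pvStep accession_id.toList is_harmonised) (4, none)).2 with
  | some kv => [kv]
  | none => []

-- ===== PRECONDITION & SPEC =====
def Spec_get_md5_for_accession (md5_checksums : List (String × String)) (accession_id : String) (is_harmonised : Bool) (out : List (String × String)) : Prop := out = get_md5_for_accession_alt md5_checksums accession_id is_harmonised
instance (md5_checksums : List (String × String)) (accession_id : String) (is_harmonised : Bool) (out : List (String × String)) : Decidable (Spec_get_md5_for_accession md5_checksums accession_id is_harmonised out) := by unfold Spec_get_md5_for_accession; infer_instance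

-- ===== CLAIM (what is proved, stated in full; the proofs are below) =====
def Claim_equal_get_md5_for_accession : Prop := ∀ (md5_checksums : List (String × String)) (accession_id : String) (is_harmonised : Bool), Dom_get_md5_for_accession md5_checksums accession_id is_harmonised → Spec_get_md5_for_accession md5_checksums accession_id is_harmonised (get_md5_for_accession md5_checksums accession_id is_harmonised)

-- ===== LEMMAS AND PROOFS =====

-- the minimal tier over a list of items (4 when empty)
def pvMt (acc : List Char) (h : Bool) : List (String × String) → Nat
  | [] => 4
  | kv :: L => min (pvTier acc h kv.1.toList) (pvMt acc h L)

theorem pvTier_ge_one (acc : List Char) (h : Bool) (k : List Char) : 1 ≤ pvTier acc h k := by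
  unfold pvTier; split_ifs <;> omega

theorem pvTier_le_four (acc : List Char) (h : Bool) (k : List Char) : pvTier acc h k ≤ 4 := by
  unfold pvTier; split_ifs <;> omega

theorem pvMt_ge_one (acc : List Char) (h : Bool) (L : List (String × String)) : 1 ≤ pvMt acc h L := by
  induction L with
  | nil => simp [pvMt]
  | cons kv L ih => have := pvTier_ge_one acc h kv.1.toList; simp [pvMt]; omega

theorem pvMt_le_of_mem (acc : List Char) (h : Bool) {L : List (String × String)} {kv : String × String}
    (hm : kv ∈ L) : pvMt acc h L ≤ pvTier acc h kv.1.toList := by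
  induction L with
  | nil => cases hm
  | cons a L ih =>
    rcases List.mem_cons.mp hm with rfl | hm'
    · simp [pvMt]
    · have := ih hm'; simp [pvMt]; omega

theorem pvMt_attained (acc : List Char) (h : Bool) {L : List (String × String)}
    (hlt : pvMt acc h L < 4) : ∃ kv ∈ L, pvTier acc h kv.1.toList = pvMt acc h L := by
  induction L with
  | nil => simp [pvMt] at hlt
  | cons a L ih =>
    by_cases hc : pvTier acc h a.1.toList ≤ pvMt acc h L
    · exact ⟨a, List.mem_cons_self, by simp [pvMt]; omega⟩
    · have hm : pvMt acc h (a :: L) = pvMt acc h L := by simp [pvMt]; omega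
      rw [hm] at hlt ⊢
      obtain ⟨kv, hmem, ht⟩ := ih hlt
      exact ⟨kv, List.mem_cons_of_mem a hmem, ht⟩

-- the single pass computes the minimal tier and the FIRST item attaining it
theorem pvFold_spec (acc : List Char) (h : Bool) (L : List (String × String)) :
    ∀ (t0 : Nat) (o0 : Option (String × String)), t0 ≤ 4 →
    L.foldl (pvStep acc h) (t0, o0) =
      if pvMt acc h L < t0 then
        (pvMt acc h L, L.find? (fun kv => pvTier acc h kv.1.toList == pvMt acc h L))
      else (t0, o0) := by
  induction L with
  | nil => intro t0 o0 ht; simp [pvMt]; omega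
  | cons a L ih =>
    intro t0 o0 ht
    have hta : pvTier acc h a.1.toList ≤ 4 := pvTier_le_four acc h a.1.toList
    have hcons : pvMt acc h (a :: L) = min (pvTier acc h a.1.toList) (pvMt acc h L) := rfl
    rw [List.foldl_cons]
    have hstep : pvStep acc h (t0, o0) a =
        if pvTier acc h a.1.toList < t0 then (pvTier acc h a.1.toList, some a) else (t0, o0) := rfl
    rw [hstep]
    by_cases hlt : pvTier acc h a.1.toList < t0
    · rw [if_pos hlt, ih _ (some a) hta]
      by_cases hm : pvMt acc h L < pvTier acc h a.1.toList
      · have h1 : pvMt acc h (a :: L) = pvMt acc h L := by omega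
        rw [if_pos hm, h1,
          List.find?_cons_of_neg (p := fun kv : String × String => pvTier acc h kv.1.toList == pvMt acc h L) (by simp; omega),
          if_pos (show pvMt acc h L < t0 by omega)]
      · have h1 : pvMt acc h (a :: L) = pvTier acc h a.1.toList := by omega
        rw [if_neg hm, h1,
          List.find?_cons_of_pos (p := fun kv : String × String => pvTier acc h kv.1.toList == pvTier acc h a.1.toList) (by simp),
          if_pos hlt]
    · rw [if_neg hlt, ih _ o0 ht]
      by_cases hm : pvMt acc h L < t0
      · have h1 : pvMt acc h (a :: L) = pvMt acc h L := by omega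
        rw [h1,
          List.find?_cons_of_neg (p := fun kv : String × String => pvTier acc h kv.1.toList == pvMt acc h L) (by simp; omega),
          if_pos hm]
      · rw [if_neg hm, if_neg (show ¬ pvMt acc h (a :: L) < t0 by omega)]

-- tier 1 is exactly loop 1's condition
theorem pvTier_eq_one (acc : List Char) (h : Bool) (k : List Char) :
    pvTier acc h k = 1 ↔ pvExact acc h k = true := by
  unfold pvTier; split_ifs <;> simp_all

-- Source B's order of the conjuncts of tier 2 agrees with loop 2's
theorem pvPartial_eq_clean (acc k : List Char) :
    pvPartial acc k = (pvClean k && PySem.Chars.isIn acc k) := by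
  unfold pvPartial pvClean
  cases PySem.Chars.isIn acc k <;> cases pvExts k <;> cases pvNoJunk k <;> rfl

theorem pvAny_eq_clean (k : List Char) :
    pvAny k = (pvClean k && (k != "md5sums.txt".toList)) := by
  unfold pvAny pvClean
  cases pvExts k <;> cases k != "md5sums.txt".toList <;> cases pvNoJunk k <;> rfl

theorem pvTier_eq_two (acc : List Char) (h : Bool) (k : List Char)
    (hE : pvExact acc h k = false) : pvTier acc h k = 2 ↔ pvPartial acc k = true := by
  rw [pvPartial_eq_clean]; unfold pvTier; split_ifs <;> simp_all

theorem pvTier_eq_three (acc : List Char) (h : Bool) (k : List Char)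
    (hE : pvExact acc h k = false) (hP : pvPartial acc k = false) :
    pvTier acc h k = 3 ↔ pvAny k = true := by
  rw [pvPartial_eq_clean] at hP; rw [pvAny_eq_clean]; unfold pvTier
  split_ifs with hA hB hC
  · simp_all
  · simp_all
  · simp_all
  · simp_all
    exact hC

theorem pvFind_congr {α : Type} (p q : α → Bool) (L : List α) (H : ∀ x ∈ L, p x = q x) :
    L.find? p = L.find? q := by
  induction L with
  | nil => rfl
  | cons a L ih =>
    simp only [List.find?_cons, H a List.mem_cons_self]
    cases q a
    · exact ih (fun x hx => H x (List.mem_cons_of_mem a hx))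
    · rfl

-- the core equivalence, over an arbitrary items list
theorem pvCore_eq (acc : List Char) (h : Bool) (L : List (String × String)) :
    (match L.find? (fun kv => pvExact acc h kv.1.toList) with
     | some kv => [kv]
     | none =>
       match L.find? (fun kv => pvPartial acc kv.1.toList) with
       | some kv => [kv]
       | none =>
         match L.find? (fun kv => pvAny kv.1.toList) with
         | some kv => [kv]
         | none => []) =
    (match (L.foldl (pvStep acc h) (4, none)).2 with
     | some kv => [kv]
     | none => []) := by
  rw [pvFold_spec acc h L 4 none (by omega)]
  cases h1 : L.find? (fun kv => pvExact acc h kv.1.toList) with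
  | some kv =>
    have hmem := List.mem_of_find?_eq_some h1
    have hp : pvExact acc h kv.1.toList = true := by simpa using List.find?_some h1
    have ht1 : pvTier acc h kv.1.toList = 1 := (pvTier_eq_one acc h _).mpr hp
    have hmt : pvMt acc h L = 1 := by
      have := pvMt_le_of_mem acc h hmem
      have := pvMt_ge_one acc h L
      omega
    have hlt : pvMt acc h L < 4 := by omega
    rw [if_pos hlt]
    have : L.find? (fun kv => pvTier acc h kv.1.toList == pvMt acc h L) =
        L.find? (fun kv => pvExact acc h kv.1.toList) := by
      apply pvFind_congr
      intro x _
      rw [hmt]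
      rcases hx : pvExact acc h x.1.toList with _ | _
      · simp; intro hc; exact absurd ((pvTier_eq_one acc h _).mp hc) (by simp [hx])
      · simp [(pvTier_eq_one acc h _).mpr hx]
    simp [this, h1]
  | none =>
    have hno1 : ∀ x ∈ L, pvExact acc h x.1.toList = false := by
      intro x hx
      have := List.find?_eq_none.mp h1 x hx
      simpa using this
    cases h2 : L.find? (fun kv => pvPartial acc kv.1.toList) with
    | some kv =>
      have hmem := List.mem_of_find?_eq_some h2
      have hp : pvPartial acc kv.1.toList = true := by simpa using List.find?_some h2
      have ht2 : pvTier acc h kv.1.toList = 2 := (pvTier_eq_two acc h _ (hno1 kv hmem)).mpr hp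
      have hmt : pvMt acc h L = 2 := by
        have hle := pvMt_le_of_mem acc h hmem
        have hge := pvMt_ge_one acc h L
        rcases Nat.lt_or_ge (pvMt acc h L) 2 with hl | hg
        · exfalso
          have hone : pvMt acc h L = 1 := by omega
          obtain ⟨x, hxm, hxt⟩ := pvMt_attained acc h (L := L) (by omega)
          rw [hone] at hxt
          exact absurd ((pvTier_eq_one acc h _).mp hxt) (by simp [hno1 x hxm])
        · omega
      have hlt : pvMt acc h L < 4 := by omega
      rw [if_pos hlt]
      have : L.find? (fun kv => pvTier acc h kv.1.toList == pvMt acc h L) =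
          L.find? (fun kv => pvPartial acc kv.1.toList) := by
        apply pvFind_congr
        intro x hx
        rw [hmt]
        rcases hxp : pvPartial acc x.1.toList with _ | _
        · simp; intro hc
          exact absurd ((pvTier_eq_two acc h _ (hno1 x hx)).mp hc) (by simp [hxp])
        · simp [(pvTier_eq_two acc h _ (hno1 x hx)).mpr hxp]
      simp [this, h2]
    | none =>
      have hno2 : ∀ x ∈ L, pvPartial acc x.1.toList = false := by
        intro x hx
        have := List.find?_eq_none.mp h2 x hx
        simpa using this
      cases h3 : L.find? (fun kv => pvAny kv.1.toList) with
      | some kv =>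
        have hmem := List.mem_of_find?_eq_some h3
        have hp : pvAny kv.1.toList = true := by simpa using List.find?_some h3
        have ht3 : pvTier acc h kv.1.toList = 3 :=
          (pvTier_eq_three acc h _ (hno1 kv hmem) (hno2 kv hmem)).mpr hp
        have hmt : pvMt acc h L = 3 := by
          have hle := pvMt_le_of_mem acc h hmem
          rcases Nat.lt_or_ge (pvMt acc h L) 3 with hl | hg
          · exfalso
            obtain ⟨x, hxm, hxt⟩ := pvMt_attained acc h (L := L) (by omega)
            have hge := pvMt_ge_one acc h L
            rcases (by omega : pvMt acc h L = 1 ∨ pvMt acc h L = 2) with he | he <;> rw [he] at hxt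
            · exact absurd ((pvTier_eq_one acc h _).mp hxt) (by simp [hno1 x hxm])
            · exact absurd ((pvTier_eq_two acc h _ (hno1 x hxm)).mp hxt) (by simp [hno2 x hxm])
          · omega
        have hlt : pvMt acc h L < 4 := by omega
        rw [if_pos hlt]
        have : L.find? (fun kv => pvTier acc h kv.1.toList == pvMt acc h L) =
            L.find? (fun kv => pvAny kv.1.toList) := by
          apply pvFind_congr
          intro x hx
          rw [hmt]
          rcases hxp : pvAny x.1.toList with _ | _
          · simp; intro hc
            exact absurd ((pvTier_eq_three acc h _ (hno1 x hx) (hno2 x hx)).mp hc) (by simp [hxp])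
          · simp [(pvTier_eq_three acc h _ (hno1 x hx) (hno2 x hx)).mpr hxp]
        simp [this, h3]
      | none =>
        have hno3 : ∀ x ∈ L, pvAny x.1.toList = false := by
          intro x hx
          have := List.find?_eq_none.mp h3 x hx
          simpa using this
        have hmt : ¬ pvMt acc h L < 4 := by
          intro hlt
          obtain ⟨x, hxm, hxt⟩ := pvMt_attained acc h (L := L) hlt
          have hge := pvMt_ge_one acc h L
          have hle := pvMt_le_of_mem acc h hxm
          rcases (by omega : pvMt acc h L = 1 ∨ pvMt acc h L = 2 ∨ pvMt acc h L = 3) with he | he | he <;> rw [he] at hxt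
          · exact absurd ((pvTier_eq_one acc h _).mp hxt) (by simp [hno1 x hxm])
          · exact absurd ((pvTier_eq_two acc h _ (hno1 x hxm)).mp hxt) (by simp [hno2 x hxm])
          · exact absurd ((pvTier_eq_three acc h _ (hno1 x hxm) (hno2 x hxm)).mp hxt) (by simp [hno3 x hxm])
        rw [if_neg hmt]

-- ===== VERDICT (by name: the statement is the Claim_ definition above) =====
theorem get_md5_for_accession_spec : Claim_equal_get_md5_for_accession := by
  intro m acc h _
  show get_md5_for_accession m acc h = get_md5_for_accession_alt m acc h
  unfold get_md5_for_accession get_md5_for_accession_alt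
  exact pvCore_eq acc.toList h (PySem.Dict.ofList m).items
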